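-- pv_equiv track=rewrite | github.com/minhnhat2001vt/Code-Validating-Multi-Agent-LLMs | multi_agent_llms/chat.py | oai_message_to_chat
-- ===== SOURCE A (Python) =====
-- def oai_message_to_chat(oai_messages, sender):
--     """Convert OpenAI message format to chat history."""
--     chat_history = []
--     messages = oai_messages[sender]
--     for i in range(0, len(messages), 2):
--         chat_history.append([
--             messages[i]["content"],
--             messages[i + 1]["content"] if i + 1 < len(messages) else "",
--         ])
--     return chat_history
-- ===== SOURCE B (Python) =====
-- def oai_message_to_chat(oai_messages, sender):
--     """Convert OpenAI message format to chat history (recursive pairing)."""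
--     def pairs(ms):
--         if not ms:
--             return []
--         if len(ms) == 1:
--             return [[ms[0]["content"], ""]]
--         return [[ms[0]["content"], ms[1]["content"]]] + pairs(ms[2:])
--     return pairs(oai_messages[sender])
-- ===== Notes on version B (the rewrite author's own statement) =====
-- stated objective: simpler
-- what changed: Replaced the strided index loop with its i+1<len guard by a direct recursion that peels the message list two elements at a time, so no index arithmetic or length checks against indices remain.
import Mathlib
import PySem

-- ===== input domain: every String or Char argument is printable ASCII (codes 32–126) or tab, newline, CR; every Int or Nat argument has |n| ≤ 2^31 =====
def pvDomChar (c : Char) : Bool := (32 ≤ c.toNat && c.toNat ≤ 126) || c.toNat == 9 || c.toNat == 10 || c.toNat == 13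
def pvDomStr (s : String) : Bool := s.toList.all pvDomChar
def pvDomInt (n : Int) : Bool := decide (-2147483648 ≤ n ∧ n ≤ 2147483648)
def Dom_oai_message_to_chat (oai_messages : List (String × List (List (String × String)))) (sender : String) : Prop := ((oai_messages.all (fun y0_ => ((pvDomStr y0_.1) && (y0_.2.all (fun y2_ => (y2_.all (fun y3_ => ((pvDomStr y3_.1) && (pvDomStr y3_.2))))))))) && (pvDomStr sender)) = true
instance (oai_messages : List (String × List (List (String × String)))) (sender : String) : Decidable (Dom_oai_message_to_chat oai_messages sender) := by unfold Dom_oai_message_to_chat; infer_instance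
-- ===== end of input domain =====

-- B replaces A's strided index loop (range(0, len, 2) with an i+1 < len guard) by a
-- direct recursion that peels the message list two at a time; objective: simpler.


-- m["content"]: first-match lookup in the message dict; default "" is only reached
-- outside Pre_ (Python raises KeyError there).
def pvContent (m : List (String × String)) : String := (m.lookup "content").getD ""

-- ===== PORT A =====
-- oai_messages[sender]: first-match dict lookup; default [] only reached outside Pre_
-- (Python raises KeyError there).
def oai_message_to_chat (oai_messages : List (String × List (List (String × String)))) (sender : String) : List (List String) :=
  let messages := (oai_messages.lookup sender).getD []
  (PySem.List.pyRange 0 (PySem.List.len messages) 2).foldl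
    (fun acc i =>
      acc ++ [[pvContent (PySem.List.pyGetD messages i []),
               if i + 1 < PySem.List.len messages then
                 pvContent (PySem.List.pyGetD messages (i + 1) [])
               else ""]])
    []

-- ===== PORT B =====
-- pairs(ms) from Source B; on m1 :: m2 :: rest, ms[2:] is rest.
def pvPairs : List (List (String × String)) → List (List String)
  | [] => []
  | [m] => [[pvContent m, ""]]
  | m1 :: m2 :: rest => [[pvContent m1, pvContent m2]] ++ pvPairs rest

def oai_message_to_chat_alt (oai_messages : List (String × List (List (String × String)))) (sender : String) : List (List String) :=
  pvPairs ((oai_messages.lookup sender).getD [])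

-- ===== PRECONDITION & SPEC =====
-- Pre_ excludes exactly the inputs where Python A raises: sender absent from the dict
-- (KeyError), or some message in messages lacking the key "content" (KeyError).
def Pre_oai_message_to_chat (oai_messages : List (String × List (List (String × String)))) (sender : String) : Prop :=
  (oai_messages.lookup sender).isSome = true ∧
  ∀ m ∈ (oai_messages.lookup sender).getD [], (m.lookup "content").isSome = true
instance (oai_messages : List (String × List (List (String × String)))) (sender : String) : Decidable (Pre_oai_message_to_chat oai_messages sender) := by unfold Pre_oai_message_to_chat; infer_instance

def pvWitness_oai_message_to_chat : (List (String × List (List (String × String)))) × String :=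
  ([("u", [[("content", "hi")], [("content", "yo")], [("content", "bye")]])], "u")

def Spec_oai_message_to_chat (oai_messages : List (String × List (List (String × String)))) (sender : String) (out : List (List String)) : Prop := out = oai_message_to_chat_alt oai_messages sender
instance (oai_messages : List (String × List (List (String × String)))) (sender : String) (out : List (List String)) : Decidable (Spec_oai_message_to_chat oai_messages sender out) := by unfold Spec_oai_message_to_chat; infer_instance

-- ===== CLAIM (what is proved, stated in full; the proofs are below) =====
def Claim_equal_oai_message_to_chat : Prop := ∀ (oai_messages : List (String × List (List (String × String)))) (sender : String), Dom_oai_message_to_chat oai_messages sender → Pre_oai_message_to_chat oai_messages sender → Spec_oai_message_to_chat oai_messages sender (oai_message_to_chat oai_messages sender)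

-- ===== LEMMAS AND PROOFS =====

theorem pvFlattenSingleton {α β : Type} (f : α → β) (l : List α) :
    (l.map (fun x => [f x])).flatten = l.map f := by
  induction l with
  | nil => simp
  | cons x xs ih => simp [ih]

-- the k-th row both programs produce for a fixed message list
def pvRow (ms : List (List (String × String))) (k : Nat) : List String :=
  [pvContent (ms.getD (2 * k) []),
   if 2 * k + 1 < ms.length then pvContent (ms.getD (2 * k + 1) []) else ""]

theorem pvPairs_eq_map (ms : List (List (String × String))) :
    pvPairs ms = (List.range ((ms.length + 1) / 2)).map (pvRow ms) := by
  induction ms using pvPairs.induct with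
  | case1 => simp [pvPairs]
  | case2 m => simp [pvPairs, pvRow, List.range_succ]
  | case3 m1 m2 rest ih =>
    have hc : ((m1 :: m2 :: rest).length + 1) / 2 = (rest.length + 1) / 2 + 1 := by
      simp; omega
    rw [pvPairs, hc, List.range_succ_eq_map, List.map_cons, List.map_map, ih]
    have hfun : (pvRow (m1 :: m2 :: rest) ∘ Nat.succ) = pvRow rest := by
      funext k
      have h2 : 2 * Nat.succ k = (2 * k + 1) + 1 := by omega
      have h3 : 2 * Nat.succ k + 1 = (2 * k + 1 + 1) + 1 := by omega
      simp only [Function.comp, pvRow, h2, List.getD_cons_succ, List.length_cons]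
      congr 1
      simp only [List.cons.injEq, and_true]
      congr 1
      exact propext (by omega)
    rw [hfun]
    simp [pvRow]

theorem loopA_eq_map (ms : List (List (String × String))) :
    (PySem.List.pyRange 0 (PySem.List.len ms) 2).foldl
      (fun acc i =>
        acc ++ [[pvContent (PySem.List.pyGetD ms i []),
                 if i + 1 < PySem.List.len ms then
                   pvContent (PySem.List.pyGetD ms (i + 1) [])
                 else ""]])
      []
    = (List.range ((ms.length + 1) / 2)).map (pvRow ms) := by
  rw [PySem.List.pyRange_of_pos 0 (PySem.List.len ms) (by norm_num)]
  rw [List.foldl_map, PySem.List.foldl_append_eq_flatMap]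
  have hc : (if (0:Int) < PySem.List.len ms then (((PySem.List.len ms) - 0 + 2 - 1) / 2).toNat else 0)
      = (ms.length + 1) / 2 := by
    simp only [PySem.List.len_eq]
    split_ifs with h <;> omega
  rw [hc]
  have hfun : (fun y : Nat =>
      [[pvContent (PySem.List.pyGetD ms (0 + 2 * (y : Int)) []),
        if 0 + 2 * (y : Int) + 1 < PySem.List.len ms then
          pvContent (PySem.List.pyGetD ms (0 + 2 * (y : Int) + 1) [])
        else ""]])
      = (fun y : Nat => [pvRow ms y]) := by
    funext y
    have h1 : (0 + 2 * (y : Int)) = ((2 * y : Nat) : Int) := by push_cast; ring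
    have h2 : ((2 * y : Nat) : Int) + 1 = ((2 * y + 1 : Nat) : Int) := by push_cast; ring
    rw [h1, h2, PySem.List.pyGetD_natCast, PySem.List.pyGetD_natCast, pvRow]
    simp only [PySem.List.len_eq, List.cons.injEq, and_true, true_and]
    congr 1
    exact propext (by exact_mod_cast Iff.rfl)
  rw [hfun]
  rw [List.flatMap_def]
  simp only [List.nil_append]
  exact pvFlattenSingleton _ _

theorem oai_message_to_chat_spec : Claim_equal_oai_message_to_chat := by
  intro oai_messages sender _ _
  unfold Spec_oai_message_to_chat oai_message_to_chat oai_message_to_chat_alt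
  rw [loopA_eq_map, pvPairs_eq_map]
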